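-- pv_equiv track=rewrite | github.com/abhaypainuly/data_structures | dynamic_programming/sum_odd_even_in_an array.py | sumOddEven
-- ===== SOURCE A (Python) =====
-- def sumOddEven(lst):
--     countEven = [0]*(len(lst)+1)
--     countOdd = [0]*(len(lst)+1)
--     for i in range(1,len(lst)+1):
--         if lst[i-1]%2==0:
--             countEven[i] = countEven[i-1] + countEven[i-1]+1
--             countOdd[i] = countOdd[i-1] + countOdd[i-1]
--         else:
--             countEven[i],countOdd[i] = countEven[i-1]+countOdd[i-1],countEven[i-1]+countOdd[i-1]+1
--     return countEven[len(lst)],countOdd[len(lst)]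
-- ===== SOURCE B (Python) =====
-- def sumOddEven(lst):
--     n = len(lst)
--     if n == 0:
--         return (0, 0)
--     if all(x % 2 == 0 for x in lst):
--         return (2**n - 1, 0)
--     return (2**(n - 1) - 1, 2**(n - 1))
-- ===== Notes on version B (the rewrite author's own statement) =====
-- stated objective: faster
-- what changed: Replaced the DP recurrence over two length-(n+1) arrays by a direct closed form: zero counts for the empty list, 2^n - 1 even-sum subsets when every element is even, otherwise 2^(n-1) - 1 even and 2^(n-1) odd, after a single parity scan.
import Mathlib
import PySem

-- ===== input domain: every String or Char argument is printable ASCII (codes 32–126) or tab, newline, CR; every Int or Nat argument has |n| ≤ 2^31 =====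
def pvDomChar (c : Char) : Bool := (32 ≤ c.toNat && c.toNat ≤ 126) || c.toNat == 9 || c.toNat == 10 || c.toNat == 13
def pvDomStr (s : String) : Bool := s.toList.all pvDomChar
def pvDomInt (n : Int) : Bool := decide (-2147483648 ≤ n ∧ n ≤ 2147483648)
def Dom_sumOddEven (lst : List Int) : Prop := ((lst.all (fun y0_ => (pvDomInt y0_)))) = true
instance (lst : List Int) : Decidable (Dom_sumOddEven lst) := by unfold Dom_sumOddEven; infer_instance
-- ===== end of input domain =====

-- B replaces A's DP over two length-(n+1) arrays by a closed form in n and the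
-- all-even test, after one parity scan: O(1) extra space and measurably faster.

-- ===== PORT A =====
-- one iteration of A's loop body (i runs over range(1, len(lst)+1); all indices are in range,
-- so List.getD is exact for the Python reads lst[i-1], countEven[i-1], countOdd[i-1])
def sumOddEvenStep (lst : List Int) (st : List Int × List Int) (i : Nat) : List Int × List Int :=
  if PySem.Int.mod (lst.getD (i - 1) 0) 2 == 0 then
    (st.1.set i (st.1.getD (i - 1) 0 + st.1.getD (i - 1) 0 + 1),
     st.2.set i (st.2.getD (i - 1) 0 + st.2.getD (i - 1) 0))
  else
    (st.1.set i (st.1.getD (i - 1) 0 + st.2.getD (i - 1) 0),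
     st.2.set i (st.1.getD (i - 1) 0 + st.2.getD (i - 1) 0 + 1))

def sumOddEven (lst : List Int) : Int × Int :=
  let n := lst.length
  let p := (List.range' 1 n).foldl (sumOddEvenStep lst)
    (List.replicate (n + 1) 0, List.replicate (n + 1) 0)
  (p.1.getD n 0, p.2.getD n 0)

-- ===== PORT B =====
def sumOddEven_alt (lst : List Int) : Int × Int :=
  if lst.length = 0 then (0, 0)
  else if lst.all (fun x => PySem.Int.mod x 2 == 0) then ((2 : Int) ^ lst.length - 1, 0)
  else ((2 : Int) ^ (lst.length - 1) - 1, (2 : Int) ^ (lst.length - 1))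

-- ===== PRECONDITION & SPEC =====
def Spec_sumOddEven (lst : List Int) (out : Int × Int) : Prop := out = sumOddEven_alt lst
instance (lst : List Int) (out : Int × Int) : Decidable (Spec_sumOddEven lst out) := by unfold Spec_sumOddEven; infer_instance

-- ===== CLAIM (what is proved, stated in full; the proofs are below) =====
def Claim_equal_sumOddEven : Prop := ∀ (lst : List Int), Dom_sumOddEven lst → Spec_sumOddEven lst (sumOddEven lst)

-- ===== LEMMAS AND PROOFS =====

-- the pair-valued version of A's recurrence (proof device only)
def pvStep (st : Int × Int) (x : Int) : Int × Int :=
  if PySem.Int.mod x 2 == 0 then (st.1 + st.1 + 1, st.2 + st.2)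
  else (st.1 + st.2, st.1 + st.2 + 1)

-- folding the pair recurrence over the whole list gives B's closed form
lemma pairFold_eq_alt (l : List Int) : l.foldl pvStep (0, 0) = sumOddEven_alt l := by
  induction l using List.reverseRecOn with
  | nil => simp [sumOddEven_alt]
  | append_singleton l x ih =>
    rw [List.foldl_append, List.foldl_cons, List.foldl_nil, ih]
    rcases l with _ | ⟨y, ys⟩
    · by_cases hx : PySem.Int.mod x 2 == 0 <;>
        simp [sumOddEven_alt, pvStep, hx]
    · have h2n : (2 : Int) ^ (ys.length + 1) = 2 * 2 ^ ys.length := by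
        rw [pow_succ]; ring
      have h2n2 : (2 : Int) ^ (ys.length + 2) = 4 * 2 ^ ys.length := by
        rw [pow_succ, pow_succ]; ring
      by_cases hall : ((y :: ys).all (fun z => PySem.Int.mod z 2 == 0)) = true <;>
        by_cases hx : (PySem.Int.mod x 2 == 0) = true <;>
          · unfold sumOddEven_alt pvStep
            simp only [List.all_append, List.all_cons, List.all_nil, List.length_append,
              List.length_cons, List.length_nil, hall, hx, Bool.and_true, Bool.and_false,
              Bool.true_and, Bool.false_and]
            norm_num [Nat.add_sub_cancel]
            all_goals simp only [Prod.mk.injEq, Nat.add_sub_cancel, pow_succ]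
            all_goals first
              | (constructor <;> ring)
              | ring
              | rfl

-- loop invariant: after k iterations the arrays keep length n+1 and slot k holds
-- the pair-recurrence value of the first k elements
lemma loop_inv (lst : List Int) (k : Nat) (hk : k ≤ lst.length) :
    ((List.range' 1 k).foldl (sumOddEvenStep lst)
        (List.replicate (lst.length + 1) 0, List.replicate (lst.length + 1) 0)).1.length
        = lst.length + 1 ∧
    ((List.range' 1 k).foldl (sumOddEvenStep lst)
        (List.replicate (lst.length + 1) 0, List.replicate (lst.length + 1) 0)).2.length
        = lst.length + 1 ∧
    (((List.range' 1 k).foldl (sumOddEvenStep lst)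
        (List.replicate (lst.length + 1) 0, List.replicate (lst.length + 1) 0)).1.getD k 0,
     ((List.range' 1 k).foldl (sumOddEvenStep lst)
        (List.replicate (lst.length + 1) 0, List.replicate (lst.length + 1) 0)).2.getD k 0)
      = (lst.take k).foldl pvStep (0, 0) := by
  induction k with
  | zero => simp
  | succ k ih =>
    obtain ⟨h1, h2, h3⟩ := ih (by omega)
    have hklt : k < lst.length := by omega
    set p := (List.range' 1 k).foldl (sumOddEvenStep lst)
        (List.replicate (lst.length + 1) 0, List.replicate (lst.length + 1) 0) with hp
    rw [List.range'_1_concat, List.foldl_append, List.foldl_cons, List.foldl_nil, ← hp]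
    have htake : lst.take (k + 1) = lst.take k ++ [lst[k]] := by
      rw [List.take_add_one, List.getElem?_eq_getElem hklt]; rfl
    have hget : lst.getD k 0 = lst[k] := by
      simp [List.getD, List.getElem?_eq_getElem hklt]
    have hset1 : k + 1 < p.1.length := by omega
    have hset2 : k + 1 < p.2.length := by omega
    have hgetD1 : ∀ v : Int, (p.1.set (k + 1) v)[k + 1]?.getD 0 = v := by
      intro v; simp [hset1]
    have hgetD2 : ∀ v : Int, (p.2.set (k + 1) v)[k + 1]?.getD 0 = v := by
      intro v; simp [hset2]
    refine ⟨?_, ?_, ?_⟩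
    · unfold sumOddEvenStep; split <;> simp [h1]
    · unfold sumOddEvenStep; split <;> simp [h2]
    · rw [htake, List.foldl_append, List.foldl_cons, List.foldl_nil, ← h3]
      unfold sumOddEvenStep pvStep
      simp only [show (1 : Nat) + k = k + 1 from by omega, Nat.add_sub_cancel, hget, List.getD]
      by_cases hc : (2 : Int) ∣ lst[k] <;>
        simp [hc, hgetD1, hgetD2, List.getElem?_eq_getElem hklt]

-- ===== VERDICT (by name: the statement is the Claim_ definition above) =====
theorem sumOddEven_spec : Claim_equal_sumOddEven := by
  intro lst _
  show sumOddEven lst = sumOddEven_alt lst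
  obtain ⟨-, -, h⟩ := loop_inv lst lst.length (le_refl _)
  rw [List.take_length, pairFold_eq_alt] at h
  exact h
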